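-- pv_equiv track=rewrite | github.com/danshinn04/NeuralNetwork_Games | chess_pgn_convert.py | match_moves_to_dict
-- ===== SOURCE A (Python) =====
-- def match_moves_to_dict(pgn_moves, moves_dict):
--     match_results = []
--     for game_moves in pgn_moves:
--         game_match_results = []
--         for move in game_moves:
--             found_match = False
--             for piece, piece_moves in moves_dict.items():
--
--
--                 # Check for pawn captures and regular moves
--                 if piece.lower() == 'p':
--                     if move in piece_moves or move.replace('x', '') in piece_moves:
--                         game_match_results.append((move, piece))
--                         found_match = True
--                         break
--                 else:
--                     if move in piece_moves:
--                         game_match_results.append((move, piece))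
--                         found_match = True
--                         break
--             if not found_match:
--                 game_match_results.append((move, "Not Found"))
--         match_results.append(game_match_results)
--     return match_results
-- ===== SOURCE B (Python) =====
-- def match_moves_to_dict(pgn_moves, moves_dict):
--     # Precompute, in one pass over the dict, for every dict entry the first
--     # piece index containing it (any piece, and pawn-only for stripped lookups);
--     # each move is then labelled with two O(1) lookups.
--     best = {}       # entry -> (first piece index, piece name), any piece
--     pawn_best = {}  # entry -> (first piece index, piece name), pawn pieces only
--     i = 0
--     for piece, piece_moves in moves_dict.items():
--         is_pawn = piece.lower() == 'p'
--         for e in piece_moves: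
--             if e not in best:
--                 best[e] = (i, piece)
--             if is_pawn and e not in pawn_best:
--                 pawn_best[e] = (i, piece)
--         i += 1
--
--     def label(move):
--         c1 = best.get(move)
--         c2 = pawn_best.get(move.replace('x', ''))
--         if c1 is None and c2 is None:
--             return "Not Found"
--         if c1 is None:
--             return c2[1]
--         if c2 is None:
--             return c1[1]
--         return c2[1] if c2[0] < c1[0] else c1[1]
--
--     return [[(move, label(move)) for move in game] for game in pgn_moves]
-- ===== Notes on version B (the rewrite author's own statement) =====
-- stated objective: faster
-- what changed: Replaces the per-move scan over all dict pieces and their move lists by a single pass that indexes every dict entry to its first matching piece (one map for direct matches, one pawn-only map for 'x'-stripped matches), so each move is labelled with two O(1) lookups.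
import Mathlib
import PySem

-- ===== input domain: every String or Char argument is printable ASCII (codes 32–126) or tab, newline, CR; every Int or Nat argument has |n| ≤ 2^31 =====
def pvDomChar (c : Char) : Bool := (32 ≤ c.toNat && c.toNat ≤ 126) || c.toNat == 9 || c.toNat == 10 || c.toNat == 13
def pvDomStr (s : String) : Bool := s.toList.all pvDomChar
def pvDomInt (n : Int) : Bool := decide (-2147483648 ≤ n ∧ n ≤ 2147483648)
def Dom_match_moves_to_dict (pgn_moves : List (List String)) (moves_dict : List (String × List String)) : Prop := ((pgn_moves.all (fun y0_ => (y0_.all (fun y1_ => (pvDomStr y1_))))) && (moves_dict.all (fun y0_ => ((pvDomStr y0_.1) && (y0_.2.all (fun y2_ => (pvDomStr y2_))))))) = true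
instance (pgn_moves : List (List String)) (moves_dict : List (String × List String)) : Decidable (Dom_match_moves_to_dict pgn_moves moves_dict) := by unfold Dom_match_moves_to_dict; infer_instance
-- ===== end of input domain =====

-- B replaces A's per-move scan over all dict pieces by two precomputed
-- entry -> first-piece-index maps built in one pass, then O(1) lookups per move.

-- ===== PORT A =====
-- A's inner 'for piece, piece_moves in moves_dict.items(): ... break' loop:
-- the first matching piece for `move`, if any.
def aFindPiece (move : String) : List (String × List String) → Option String
  | [] => none
  | (piece, pm) :: rest =>
    if PySem.Str.lower piece == "p" then
      if pm.contains move || pm.contains (PySem.Str.replace move "x" "") then some piece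
      else aFindPiece move rest
    else
      if pm.contains move then some piece
      else aFindPiece move rest

def match_moves_to_dict (pgn_moves : List (List String)) (moves_dict : List (String × List String)) : List (List (String × String)) :=
  let items := (PySem.Dict.ofList moves_dict).items
  pgn_moves.map (fun game_moves => game_moves.map (fun move =>
    match aFindPiece move items with
    | some piece => (move, piece)
    | none => (move, "Not Found")))

-- ===== PORT B =====
-- inner 'for e in piece_moves:' loop of Source B
def bAddEntries (i : Int) (piece : String) (isPawn : Bool) :
    List String → PySem.Dict String (Int × String) → PySem.Dict String (Int × String) →
    PySem.Dict String (Int × String) × PySem.Dict String (Int × String)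
  | [], b, p => (b, p)
  | e :: es, b, p =>
      let b' := if b.contains e then b else b.insert e (i, piece)
      let p' := if isPawn && !p.contains e then p.insert e (i, piece) else p
      bAddEntries i piece isPawn es b' p'

-- outer 'for piece, piece_moves in moves_dict.items(): ...; i += 1' loop of Source B
def bBuild : List (String × List String) → Int →
    PySem.Dict String (Int × String) → PySem.Dict String (Int × String) →
    PySem.Dict String (Int × String) × PySem.Dict String (Int × String)
  | [], _, b, p => (b, p)
  | (piece, pm) :: rest, i, b, p =>
      let bp := bAddEntries i piece (PySem.Str.lower piece == "p") pm b p
      bBuild rest (i + 1) bp.1 bp.2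

-- Source B's label()
def bLabel (best pawn_best : PySem.Dict String (Int × String)) (move : String) : String :=
  match best.get? move, pawn_best.get? (PySem.Str.replace move "x" "") with
  | none, none => "Not Found"
  | none, some c2 => c2.2
  | some c1, none => c1.2
  | some c1, some c2 => if c2.1 < c1.1 then c2.2 else c1.2

def match_moves_to_dict_alt (pgn_moves : List (List String)) (moves_dict : List (String × List String)) : List (List (String × String)) :=
  let items := (PySem.Dict.ofList moves_dict).items
  let bp := bBuild items 0 .empty .empty
  pgn_moves.map (fun game => game.map (fun move => (move, bLabel bp.1 bp.2 move)))

-- ===== PRECONDITION & SPEC =====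
def Spec_match_moves_to_dict (pgn_moves : List (List String)) (moves_dict : List (String × List String)) (out : List (List (String × String))) : Prop := out = match_moves_to_dict_alt pgn_moves moves_dict
instance (pgn_moves : List (List String)) (moves_dict : List (String × List String)) (out : List (List (String × String))) : Decidable (Spec_match_moves_to_dict pgn_moves moves_dict out) := by unfold Spec_match_moves_to_dict; infer_instance

-- ===== CLAIM (what is proved, stated in full; the proofs are below) =====
def Claim_equal_match_moves_to_dict : Prop := ∀ (pgn_moves : List (List String)) (moves_dict : List (String × List String)), Dom_match_moves_to_dict pgn_moves moves_dict → Spec_match_moves_to_dict pgn_moves moves_dict (match_moves_to_dict pgn_moves moves_dict)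

-- ===== LEMMAS AND PROOFS =====

-- first piece (with its index, starting at i) whose move list contains e
def firstDir : List (String × List String) → String → Int → Option (Int × String)
  | [], _, _ => none
  | (piece, pm) :: rest, e, i =>
      if pm.contains e then some (i, piece) else firstDir rest e (i + 1)

-- first pawn piece (with its index) whose move list contains e
def firstPawn : List (String × List String) → String → Int → Option (Int × String)
  | [], _, _ => none
  | (piece, pm) :: rest, e, i =>
      if (PySem.Str.lower piece == "p") && pm.contains e then some (i, piece)
      else firstPawn rest e (i + 1)

def pick : Option (Int × String) → Option (Int × String) → Option String
  | none, none => none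
  | none, some c2 => some c2.2
  | some c1, none => some c1.2
  | some c1, some c2 => if c2.1 < c1.1 then some c2.2 else some c1.2

theorem firstDir_ge (items : List (String × List String)) (e : String) (i : Int) (c : Int × String)
    (h : firstDir items e i = some c) : i ≤ c.1 := by
  induction items generalizing i with
  | nil => simp [firstDir] at h
  | cons hd tl ih =>
    obtain ⟨piece, pm⟩ := hd
    simp only [firstDir] at h
    split at h
    · cases h; simp
    · have := ih (i + 1) h; omega

theorem firstPawn_ge (items : List (String × List String)) (e : String) (i : Int) (c : Int × String)
    (h : firstPawn items e i = some c) : i ≤ c.1 := by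
  induction items generalizing i with
  | nil => simp [firstPawn] at h
  | cons hd tl ih =>
    obtain ⟨piece, pm⟩ := hd
    simp only [firstPawn] at h
    split at h
    · cases h; simp
    · have := ih (i + 1) h; omega

-- bAddEntries looked up afterwards: inserts-if-absent over es
theorem bAddEntries_get (i : Int) (piece : String) (isPawn : Bool)
    (es : List String) (b p : PySem.Dict String (Int × String)) (e : String) :
    ((bAddEntries i piece isPawn es b p).1.get? e
        = ((b.get? e).or (if es.contains e then some (i, piece) else none)))
    ∧ ((bAddEntries i piece isPawn es b p).2.get? e
        = ((p.get? e).or (if isPawn && es.contains e then some (i, piece) else none))) := by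
  induction es generalizing b p with
  | nil => simp [bAddEntries]
  | cons x xs ih =>
    simp only [bAddEntries]
    have hc := fun (d : PySem.Dict String (Int × String)) =>
      PySem.Dict.contains_eq_isSome_get? d x
    constructor
    · rw [(ih _ _).1]
      by_cases hx : x = e
      · subst hx
        by_cases hb : (b.get? x).isSome
        · obtain ⟨v, hv⟩ := Option.isSome_iff_exists.mp hb
          simp [hc, hv]
        · have hbn : b.get? x = none := Option.not_isSome_iff_eq_none.mp hb
          by_cases hbc : b.contains x = true
          · rw [hc] at hbc; simp [hbn] at hbc
          · have hbc' : b.contains x = false := by simpa using hbc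
            simp [hbc', hbn]
      · have hex : ¬ e = x := fun h => hx h.symm
        by_cases hbc : b.contains x = true
        · simp [hbc, hex]
        · simp [hbc, PySem.Dict.get?_insert, Ne.symm hx, hex]
    · rw [(ih _ _).2]
      by_cases hx : x = e
      · subst hx
        by_cases hpw : isPawn
        · by_cases hp : (p.get? x).isSome
          · obtain ⟨v, hv⟩ := Option.isSome_iff_exists.mp hp
            have hpc : p.contains x = true := by rw [hc]; simp [hv]
            simp [hpw, hpc, hv]
          · have hpn : p.get? x = none := Option.not_isSome_iff_eq_none.mp hp
            have hpc : p.contains x = false := by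
              rw [hc, hpn]; rfl
            simp [hpw, hpc, hpn]
        · simp [hpw]
      · have hex : ¬ e = x := fun h => hx h.symm
        by_cases hpw : isPawn
        · by_cases hpc : p.contains x = true
          · simp [hpw, hpc, hex]
          · simp [hpw, hpc, PySem.Dict.get?_insert, Ne.symm hx, hex]
        · simp [hpw, hex]

theorem bBuild_get (items : List (String × List String)) (i : Int)
    (b p : PySem.Dict String (Int × String)) (e : String) :
    ((bBuild items i b p).1.get? e = (b.get? e).or (firstDir items e i))
    ∧ ((bBuild items i b p).2.get? e = (p.get? e).or (firstPawn items e i)) := by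
  induction items generalizing i b p with
  | nil => simp [bBuild, firstDir, firstPawn]
  | cons hd tl ih =>
    obtain ⟨piece, pm⟩ := hd
    simp only [bBuild, firstDir, firstPawn]
    have hadd := bAddEntries_get i piece (PySem.Str.lower piece == "p") pm b p e
    constructor
    · rw [(ih _ _ _).1, hadd.1]
      by_cases hm : e ∈ pm
      · simp [hm, Option.or_assoc]
      · simp [hm]
    · rw [(ih _ _ _).2, hadd.2]
      by_cases hpw : (PySem.Str.lower piece == "p") = true
      · by_cases hm : e ∈ pm
        · simp [hpw, hm, Option.or_assoc]
        · simp [hpw, hm]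
      · simp [hpw]

theorem aFindPiece_eq_pick (move : String) (items : List (String × List String)) (i : Int) :
    aFindPiece move items
      = pick (firstDir items move i) (firstPawn items (PySem.Str.replace move "x" "") i) := by
  induction items generalizing i with
  | nil => simp [aFindPiece, firstDir, firstPawn, pick]
  | cons hd tl ih =>
    obtain ⟨piece, pm⟩ := hd
    simp only [aFindPiece, firstDir, firstPawn]
    by_cases hpw : (PySem.Str.lower piece == "p") = true
    · by_cases hm : move ∈ pm
      · by_cases hs : PySem.Str.replace move "x" "" ∈ pm
        · simp [hpw, hm, hs, pick]
        · cases hfp : firstPawn tl (PySem.Str.replace move "x" "") (i + 1) with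
          | none => simp [hpw, hm, hs, pick]
          | some c =>
            have := firstPawn_ge _ _ _ _ hfp
            simp [hpw, hm, hs, pick, show ¬ c.1 < i by omega]
      · by_cases hs : PySem.Str.replace move "x" "" ∈ pm
        · cases hfd : firstDir tl move (i + 1) with
          | none => simp [hpw, hm, hs, pick]
          | some c =>
            have := firstDir_ge _ _ _ _ hfd
            simp [hpw, hm, hs, pick, show i < c.1 by omega]
        · simp [hpw, hm, hs]
          exact ih (i + 1)
    · have hpwf : (PySem.Str.lower piece == "p") = false := by
        simpa using hpw
      by_cases hm : move ∈ pm
      · cases hfp : firstPawn tl (PySem.Str.replace move "x" "") (i + 1) with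
        | none => simp [hpwf, hm, pick]
        | some c =>
          have := firstPawn_ge _ _ _ _ hfp
          simp [hpwf, hm, pick, show ¬ c.1 < i by omega]
      · simp [hpwf, hm]
        exact ih (i + 1)

theorem label_eq (items : List (String × List String)) (move : String) :
    (move, bLabel (bBuild items 0 .empty .empty).1 (bBuild items 0 .empty .empty).2 move)
      = (match aFindPiece move items with
         | some piece => (move, piece)
         | none => (move, "Not Found")) := by
  have h := bBuild_get items 0 .empty .empty
  rw [aFindPiece_eq_pick move items 0]
  unfold bLabel
  rw [(h move).1, (h (PySem.Str.replace move "x" "")).2]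
  simp only [PySem.Dict.get?_empty, Option.none_or]
  cases firstDir items move 0 <;>
    cases firstPawn items (PySem.Str.replace move "x" "") 0 <;>
      simp [pick] <;> split <;> simp

-- ===== VERDICT (by name: the statement is the Claim_ definition above) =====
theorem match_moves_to_dict_spec : Claim_equal_match_moves_to_dict := by
  intro pgn_moves moves_dict _
  unfold Spec_match_moves_to_dict match_moves_to_dict match_moves_to_dict_alt
  simp only []
  apply List.map_congr_left
  intro game _
  apply List.map_congr_left
  intro move _
  exact (label_eq _ move).symm
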